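-- pv_equiv track=rewrite | github.com/petercollingridge/code-for-blog | maths-for-games/memory-game/simulate_game.py | get_limited_decks
-- ===== SOURCE A (Python) =====
-- from string import ascii_uppercase
--
-- def get_limited_decks(n):
--     """ Get all possible decks of n pair, where the first A is before the first B, and so on. """
--     alphabet = ascii_uppercase[:n]
--     num_cards = 2 * n
--     decks = [{}]
--
--     for card in alphabet:
--         new_decks = []
--
--         # Add card to the first empty position in each existing deck
--         for deck in decks:
--             for i in range(num_cards):
--                 if deck.get(i) is None:
--                     deck[i] = card
--                     break
--
--             # Add a second card at every empty space
--             for i in range(num_cards):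
--                 if deck.get(i) is None:
--                     new_deck = deck.copy()
--                     new_deck[i] = card
--                     new_decks.append(new_deck)
--
--         decks = new_decks
--
--     # Convert objects into strings of cards
--     string_decks = []
--     for deck in decks:
--         string_decks.append("".join(deck[i] for i in range(num_cards)))
--
--     return string_decks
-- ===== SOURCE B (Python) =====
-- from string import ascii_uppercase
--
-- def get_limited_decks(n):
--     """ Get all possible decks of n pairs; depth-first recursion over letters instead of level-by-level accumulation. """
--     num_cards = 2 * n
--
--     def place(deck, remaining):
--         if not remaining:
--             return ["".join(deck[i] for i in range(num_cards))]
--         card = remaining[0]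
--         empties = [i for i in range(num_cards) if deck.get(i) is None]
--         results = []
--         for i in empties[1:]:
--             full = deck.copy()
--             full[empties[0]] = card
--             full[i] = card
--             results.extend(place(full, remaining[1:]))
--         return results
--
--     return place({}, ascii_uppercase[:n])
-- ===== Notes on version B (the rewrite author's own statement) =====
-- stated objective: alternative
-- what changed: Replaces A's level-by-level BFS (rebuilding the whole list of partial decks once per letter, with a separate first-empty scan and a second placement scan per deck) by a depth-first recursion over the letters that expands one deck at a time, computing the empty positions of a deck in a single scan and emitting finished decks at the leaves in the same order.
import Mathlib
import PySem

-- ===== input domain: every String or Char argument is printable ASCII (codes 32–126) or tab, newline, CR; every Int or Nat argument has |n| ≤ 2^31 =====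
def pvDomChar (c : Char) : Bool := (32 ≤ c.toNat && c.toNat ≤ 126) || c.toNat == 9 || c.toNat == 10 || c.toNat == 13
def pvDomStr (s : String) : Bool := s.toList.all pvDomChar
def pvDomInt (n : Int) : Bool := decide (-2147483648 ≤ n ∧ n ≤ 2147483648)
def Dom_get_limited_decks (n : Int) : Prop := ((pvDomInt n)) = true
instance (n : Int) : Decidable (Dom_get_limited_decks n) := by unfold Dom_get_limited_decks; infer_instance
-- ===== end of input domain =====

-- B replaces A's breadth-first, level-by-level accumulation of partial decks by a depth-first
-- recursion over the letters (alternative decomposition, same output list).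

-- ===== PORT A =====
-- string.ascii_uppercase
def pvUpper : List Char :=
  ['A','B','C','D','E','F','G','H','I','J','K','L','M',
   'N','O','P','Q','R','S','T','U','V','W','X','Y','Z']

-- 'for i in range(num_cards): if deck.get(i) is None: deck[i] = card; break'
def pvA_firstEmpty (deck : PySem.Dict Int Char) (card : Char) : List Int → PySem.Dict Int Char
  | [] => deck
  | i :: rest => if deck.get? i = none then deck.insert i card else pvA_firstEmpty deck card rest

def get_limited_decks (n : Int) : List String :=
  let alphabet := PySem.List.slice pvUpper none (some n)   -- ascii_uppercase[:n]
  let num_cards := 2 * n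
  let decks : List (PySem.Dict Int Char) := [PySem.Dict.empty]
  let decks := alphabet.foldl (fun decks card =>
    decks.foldl (fun new_decks deck =>
      let deck := pvA_firstEmpty deck card (PySem.List.pyRange 0 num_cards 1)
      -- 'for i in range(num_cards): if deck.get(i) is None: new_decks.append(deck | {i: card})'
      (PySem.List.pyRange 0 num_cards 1).foldl
        (fun new_decks i =>
          if deck.get? i = none then new_decks ++ [deck.insert i card] else new_decks)
        new_decks) []) decks
  -- '"".join(deck[i] for i in range(num_cards))'; deck[i] raises KeyError on a missing key,
  -- which is only reachable for n ≥ 27: for n ≤ 26 every final deck is fully filled and the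
  -- .getD 'A' total form is exact.
  decks.foldl (fun string_decks deck =>
    string_decks ++
      [String.ofList ((PySem.List.pyRange 0 num_cards 1).map (fun i => (deck.get? i).getD 'A'))]) []

-- ===== PORT B =====
-- place(deck, remaining) from Source B; recursion over the remaining letters.
def pvB_place (num_cards : Int) (letters : List Char) (deck : PySem.Dict Int Char) : List String :=
  match letters with
  | [] =>
      -- '"".join(deck[i] for i in range(num_cards))' — same KeyError caveat as in port A (exact for n ≤ 26)
      [String.ofList ((PySem.List.pyRange 0 num_cards 1).map (fun i => (deck.get? i).getD 'A'))]
  | card :: rest =>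
      -- 'empties = [i for i in range(num_cards) if deck.get(i) is None]'
      let empties := (PySem.List.pyRange 0 num_cards 1).filter (fun i => decide (deck.get? i = none))
      -- 'for i in empties[1:]: full = deck.copy(); full[empties[0]] = card; full[i] = card; results.extend(...)'
      -- empties[0] (.getD 0 total form) is only consumed when the loop runs, i.e. empties ≠ [].
      (PySem.List.slice empties (some 1) none).foldl
        (fun results i =>
          results ++ pvB_place num_cards rest
            ((deck.insert (PySem.List.pyGetD empties 0 0) card).insert i card)) []
  termination_by letters.length
  decreasing_by simp

def get_limited_decks_alt (n : Int) : List String :=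
  let num_cards := 2 * n
  pvB_place num_cards (PySem.List.slice pvUpper none (some n)) PySem.Dict.empty

-- ===== PRECONDITION & SPEC =====
def Spec_get_limited_decks (n : Int) (out : List String) : Prop := out = get_limited_decks_alt n
instance (n : Int) (out : List String) : Decidable (Spec_get_limited_decks n out) := by unfold Spec_get_limited_decks; infer_instance

-- ===== CLAIM (what is proved, stated in full; the proofs are below) =====
def Claim_equal_get_limited_decks : Prop := ∀ (n : Int), Dom_get_limited_decks n → Spec_get_limited_decks n (get_limited_decks n)

-- ===== LEMMAS AND PROOFS =====

-- A's inner expansion of one deck by one card, as a plain list.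
def pvExpand (idxs : List Int) (card : Char) (deck : PySem.Dict Int Char) :
    List (PySem.Dict Int Char) :=
  let d' := pvA_firstEmpty deck card idxs
  (idxs.filter (fun i => decide (d'.get? i = none))).map (fun i => d'.insert i card)

theorem pv_firstEmpty_eq (deck : PySem.Dict Int Char) (card : Char) (idxs : List Int) :
    pvA_firstEmpty deck card idxs =
      (match idxs.filter (fun i => decide (deck.get? i = none)) with
       | [] => deck
       | f :: _ => deck.insert f card) := by
  induction idxs with
  | nil => rfl
  | cons i rest ih =>
      by_cases h : deck.get? i = none <;>
        simp [pvA_firstEmpty, h, ih]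

theorem pv_filter_insert (deck : PySem.Dict Int Char) (f : Int) (card : Char) (idxs : List Int) :
    idxs.filter (fun i => decide (((deck.insert f card).get? i) = none)) =
      (idxs.filter (fun i => decide (deck.get? i = none))).filter (fun i => decide (i ≠ f)) := by
  rw [List.filter_filter]
  apply List.filter_congr
  intro i _
  by_cases h : i = f <;> simp [PySem.Dict.get?_insert, h]

theorem pv_expand_nil (idxs : List Int) (card : Char) (deck : PySem.Dict Int Char)
    (h : idxs.filter (fun i => decide (deck.get? i = none)) = []) :
    pvExpand idxs card deck = [] := by
  simp [pvExpand, pv_firstEmpty_eq, h]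

theorem pv_expand_cons (idxs : List Int) (card : Char) (deck : PySem.Dict Int Char)
    (hnd : idxs.Nodup) (f : Int) (t : List Int)
    (h : idxs.filter (fun i => decide (deck.get? i = none)) = f :: t) :
    pvExpand idxs card deck = t.map (fun i => (deck.insert f card).insert i card) := by
  have hft : (idxs.filter (fun i => decide (deck.get? i = none))).Nodup := hnd.filter _
  rw [h] at hft
  have hfnot : f ∉ t := (List.nodup_cons.mp hft).1
  simp only [pvExpand, pv_firstEmpty_eq, h]
  rw [pv_filter_insert, h]
  have : (f :: t).filter (fun i => decide (i ≠ f)) = t := by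
    simp [List.filter_eq_self]
    intro a ha haf
    exact hfnot (haf ▸ ha)
  rw [this]

-- A's inner per-deck loop equals appending pvExpand.
theorem pv_inner_eq (idxs : List Int) (card : Char) (deck : PySem.Dict Int Char)
    (acc : List (PySem.Dict Int Char)) :
    (idxs.foldl
      (fun new_decks i =>
        if (pvA_firstEmpty deck card idxs).get? i = none
        then new_decks ++ [(pvA_firstEmpty deck card idxs).insert i card] else new_decks) acc)
      = acc ++ pvExpand idxs card deck := by
  simpa [pvExpand] using
    PySem.List.foldl_append_ite
      (p := fun i => (pvA_firstEmpty deck card idxs).get? i = none)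
      (f := fun i => (pvA_firstEmpty deck card idxs).insert i card)
      (l := idxs) (acc := acc)

theorem pv_place_nil (nc : Int) (deck : PySem.Dict Int Char) :
    pvB_place nc [] deck =
      [String.ofList ((PySem.List.pyRange 0 nc 1).map (fun i => (deck.get? i).getD 'A'))] := by
  rw [pvB_place]

-- B's recursive step equals expanding and recursing.
theorem pv_place_cons (nc : Int) (card : Char) (rest : List Char) (deck : PySem.Dict Int Char) :
    pvB_place nc (card :: rest) deck =
      (pvExpand (PySem.List.pyRange 0 nc 1) card deck).flatMap (pvB_place nc rest) := by
  have hnd : (PySem.List.pyRange 0 nc 1).Nodup := PySem.List.nodup_pyRange_one 0 nc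
  rw [pvB_place]
  rcases hes : (PySem.List.pyRange 0 nc 1).filter (fun i => decide (deck.get? i = none)) with
    _ | ⟨f, t⟩
  · simp [pv_expand_nil _ _ _ hes, PySem.List.slice_from_one]
  · rw [pv_expand_cons _ _ _ hnd f t hes]
    simp only [PySem.List.slice_from_one, List.tail_cons, PySem.List.pyGetD_zero_cons]
    rw [PySem.List.foldl_append_eq_flatMap]
    simp [List.flatMap_map]

-- Main invariant: mapping the join over A's letter-by-letter fold is B's DFS on each deck.
theorem pv_main (nc : Int) (letters : List Char) (decks : List (PySem.Dict Int Char)) :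
    (letters.foldl (fun decks card =>
        decks.foldl (fun new_decks deck =>
          let deck := pvA_firstEmpty deck card (PySem.List.pyRange 0 nc 1)
          (PySem.List.pyRange 0 nc 1).foldl
            (fun new_decks i =>
              if deck.get? i = none then new_decks ++ [deck.insert i card] else new_decks)
            new_decks) []) decks).map
        (fun deck => String.ofList ((PySem.List.pyRange 0 nc 1).map (fun i => (deck.get? i).getD 'A')))
      = decks.flatMap (pvB_place nc letters) := by
  induction letters generalizing decks with
  | nil =>
      simp only [List.foldl_nil]
      induction decks with
      | nil => simp
      | cons d ds ihd => simp [pv_place_nil, ihd]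
  | cons card rest ih =>
      simp only [List.foldl_cons]
      rw [ih]
      have hstep : (decks.foldl (fun new_decks deck =>
          let deck := pvA_firstEmpty deck card (PySem.List.pyRange 0 nc 1)
          (PySem.List.pyRange 0 nc 1).foldl
            (fun new_decks i =>
              if deck.get? i = none then new_decks ++ [deck.insert i card] else new_decks)
            new_decks) []) = decks.flatMap (pvExpand (PySem.List.pyRange 0 nc 1) card) := by
        have h1 : (decks.foldl (fun new_decks deck =>
            let deck := pvA_firstEmpty deck card (PySem.List.pyRange 0 nc 1)
            (PySem.List.pyRange 0 nc 1).foldl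
              (fun new_decks i =>
                if deck.get? i = none then new_decks ++ [deck.insert i card] else new_decks)
              new_decks) [])
            = decks.foldl (fun acc deck => acc ++ pvExpand (PySem.List.pyRange 0 nc 1) card deck) [] :=
          PySem.List.foldl_congr_mem _ _ _ _
            (fun acc deck _ => pv_inner_eq (PySem.List.pyRange 0 nc 1) card deck acc)
        rw [h1]
        simpa using PySem.List.foldl_append_eq_flatMap
          (g := pvExpand (PySem.List.pyRange 0 nc 1) card) (l := decks) (acc := [])
      rw [hstep, List.flatMap_assoc]
      apply List.flatMap_congr
      intro d _
      exact (pv_place_cons nc card rest d).symm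

-- ===== VERDICT (by name: the statement is the Claim_ definition above) =====
theorem get_limited_decks_spec : Claim_equal_get_limited_decks := by
  intro n _
  unfold Spec_get_limited_decks get_limited_decks get_limited_decks_alt
  have := pv_main (2 * n) (PySem.List.slice pvUpper none (some n)) [PySem.Dict.empty]
  simp only [List.flatMap_cons, List.flatMap_nil, List.append_nil] at this
  rw [← this]
  rw [PySem.List.foldl_append_singleton_eq_map]
  simp
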